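-- pv_equiv track=rewrite | github.com/dtoma95/dota2_mmr_estimation | models/RNN/read_data.py | items_one_hot
-- ===== SOURCE A (Python) =====
-- def items_one_hot(my_items, items):
--     retval = []
--     for key in items.keys():
--         retval.append(0)
--     for item_id in my_items:
--         if item_id == 0:
--             continue
--         if item_id < 265:
--             index_for_dic = item_id - 1
--         else:
--             index_for_dic = item_id - 2
--
--         retval[index_for_dic] += 1
--     return retval
-- ===== SOURCE B (Python) =====
-- def items_one_hot(my_items, items):
--     counts = {}
--     for item_id in my_items:
--         if item_id != 0:
--             counts[item_id] = counts.get(item_id, 0) + 1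
--     retval = [0] * len(items)
--     for item_id, c in counts.items():
--         index_for_dic = item_id - 1 if item_id < 265 else item_id - 2
--         retval[index_for_dic] += c
--     return retval
-- ===== Notes on version B (the rewrite author's own statement) =====
-- stated objective: idiomatic
-- what changed: B replaces A's per-item in-place increment scan with a two-pass count-then-scatter: first a frequency dict of nonzero item ids is built, then a zero vector [0]*len(items) is allocated and each (id,count) pair is scattered once into its <265-adjusted slot.
import Mathlib
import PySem

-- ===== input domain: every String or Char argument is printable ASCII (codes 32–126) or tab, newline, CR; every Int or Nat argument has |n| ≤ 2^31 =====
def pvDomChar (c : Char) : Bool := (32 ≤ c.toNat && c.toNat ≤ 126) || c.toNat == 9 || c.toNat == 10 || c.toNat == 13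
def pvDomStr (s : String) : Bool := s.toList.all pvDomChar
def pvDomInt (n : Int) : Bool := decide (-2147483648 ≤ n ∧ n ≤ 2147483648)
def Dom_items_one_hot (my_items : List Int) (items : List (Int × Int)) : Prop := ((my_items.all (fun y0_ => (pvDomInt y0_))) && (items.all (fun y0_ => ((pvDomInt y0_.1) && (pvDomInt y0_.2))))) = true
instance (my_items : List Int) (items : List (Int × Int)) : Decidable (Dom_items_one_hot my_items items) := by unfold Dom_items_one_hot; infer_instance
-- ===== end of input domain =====

-- B replaces A's per-item in-place increment scan with a two-pass count-then-scatter
-- structure (frequency dict first, then one scatter into a pre-allocated zero vector);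
-- same cost, more idiomatic decomposition.

-- ===== PORT A =====
def items_one_hot (my_items : List Int) (items : List (Int × Int)) : List Int :=
  -- retval = []; for key in items.keys(): retval.append(0)
  let retval : List Int :=
    (PySem.List.dedup (items.map Prod.fst)).foldl (fun acc _ => acc ++ [0]) []
  -- for item_id in my_items: … retval[index_for_dic] += 1
  my_items.foldl (fun acc item_id =>
    if item_id = 0 then acc
    else
      let index_for_dic : Int := if item_id < 265 then item_id - 1 else item_id - 2
      PySem.List.pySetD acc index_for_dic (PySem.List.pyGetD acc index_for_dic 0 + 1))
    retval

-- ===== PORT B =====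
def items_one_hot_alt (my_items : List Int) (items : List (Int × Int)) : List Int :=
  -- counts = {}; for item_id in my_items: if item_id != 0: counts[item_id] = counts.get(item_id, 0) + 1
  let counts : PySem.Dict Int Int :=
    my_items.foldl (fun d item_id =>
      if item_id ≠ 0 then d.insert item_id (d.getD item_id 0 + 1) else d)
      PySem.Dict.empty
  -- retval = [0] * len(items)
  let retval : List Int := List.replicate (PySem.List.dedup (items.map Prod.fst)).length 0
  -- for item_id, c in counts.items(): retval[idx] += c
  counts.items.foldl (fun acc p =>
    let index_for_dic : Int := if p.1 < 265 then p.1 - 1 else p.1 - 2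
    PySem.List.pySetD acc index_for_dic (PySem.List.pyGetD acc index_for_dic 0 + p.2))
    retval

-- ===== PRECONDITION & SPEC =====
-- Pre_ excludes exactly the inputs where Python A raises IndexError: a nonzero item id whose
-- adjusted index falls outside [-len, len) of the (distinct-key) items dict.
def Pre_items_one_hot (my_items : List Int) (items : List (Int × Int)) : Prop :=
  ∀ id ∈ my_items, id ≠ 0 →
    -(((PySem.List.dedup (items.map Prod.fst)).length : Int)) ≤ (if id < 265 then id - 1 else id - 2) ∧
    (if id < 265 then id - 1 else id - 2) < ((PySem.List.dedup (items.map Prod.fst)).length : Int)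
instance (my_items : List Int) (items : List (Int × Int)) : Decidable (Pre_items_one_hot my_items items) := by
  unfold Pre_items_one_hot; infer_instance

def pvWitness_items_one_hot : List Int × (List (Int × Int)) :=
  ([1, 3, 1, -1, 0], [(1, 5), (2, 0), (3, 7)])

def Spec_items_one_hot (my_items : List Int) (items : List (Int × Int)) (out : List Int) : Prop := out = items_one_hot_alt my_items items
instance (my_items : List Int) (items : List (Int × Int)) (out : List Int) : Decidable (Spec_items_one_hot my_items items out) := by unfold Spec_items_one_hot; infer_instance

-- ===== CLAIM (what is proved, stated in full; the proofs are below) =====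
def Claim_equal_items_one_hot : Prop := ∀ (my_items : List Int) (items : List (Int × Int)), Dom_items_one_hot my_items items → Pre_items_one_hot my_items items → Spec_items_one_hot my_items items (items_one_hot my_items items)

-- ===== LEMMAS AND PROOFS =====

-- the raw (possibly negative) index Python computes for an item id
def pvRaw (id : Int) : Int := if id < 265 then id - 1 else id - 2

-- the Nat position a Python index i addresses in a list of length n (valid under InRange)
def pvToIdx (n : Nat) (i : Int) : Nat := if i < 0 then n - (-i).toNat else i.toNat

-- "xs[j] += c" on a Nat index
def pvAddAt (xs : List Int) (j : Nat) (c : Int) : List Int := xs.set j (xs.getD j 0 + c)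

lemma pv_pyIdx?_eq {n : Nat} {i : Int} (h : PySem.Raise.InRange n i) :
    PySem.List.pyIdx? n i = some (pvToIdx n i) := by
  rcases h with ⟨h1, h2⟩
  unfold PySem.List.pyIdx? pvToIdx
  split_ifs <;> first | rfl | omega

lemma pv_toIdx_lt {n : Nat} {i : Int} (h : PySem.Raise.InRange n i) : pvToIdx n i < n := by
  rcases h with ⟨h1, h2⟩
  unfold pvToIdx
  split_ifs <;> omega

lemma pv_set_eq (xs : List Int) (i c : Int) (h : PySem.Raise.InRange xs.length i) :
    PySem.List.pySetD xs i (PySem.List.pyGetD xs i 0 + c) = pvAddAt xs (pvToIdx xs.length i) c := by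
  have hk := pv_pyIdx?_eq h
  have hlt := pv_toIdx_lt h
  unfold PySem.List.pySetD PySem.List.pySet? PySem.List.pyGetD PySem.List.pyGet? pvAddAt
  rw [hk]
  simp [List.getD_eq_getElem?_getD, List.getElem?_eq_getElem hlt]

lemma pv_addAt_length (xs : List Int) (j : Nat) (c : Int) : (pvAddAt xs j c).length = xs.length := by
  simp [pvAddAt]

lemma pv_getD_addAt (xs : List Int) (k j : Nat) (c : Int) (hk : k < xs.length) :
    (pvAddAt xs k c).getD j 0 = if j = k then xs.getD j 0 + c else xs.getD j 0 := by
  unfold pvAddAt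
  by_cases hj : j = k
  · subst hj
    simp [List.getD_eq_getElem?_getD, hk]
  · simp [List.getD_eq_getElem?_getD, List.getElem?_set_ne (fun hkj => hj hkj.symm), hj]

lemma pv_foldl_addAt_length (ps : List (Nat × Int)) (base : List Int) :
    (ps.foldl (fun xs p => pvAddAt xs p.1 p.2) base).length = base.length := by
  induction ps generalizing base with
  | nil => rfl
  | cons p t ih => rw [List.foldl_cons, ih, pv_addAt_length]

lemma pv_foldl_addAt_getD (ps : List (Nat × Int)) (base : List Int) (j : Nat)
    (hp : ∀ p ∈ ps, p.1 < base.length) :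
    (ps.foldl (fun xs p => pvAddAt xs p.1 p.2) base).getD j 0
      = base.getD j 0 + ((ps.filter (fun p => p.1 == j)).map Prod.snd).sum := by
  induction ps generalizing base with
  | nil => simp
  | cons p t ih =>
    have h1 : p.1 < base.length := hp p (List.mem_cons_self ..)
    have hrec := ih (pvAddAt base p.1 p.2)
      (by intro q hq; rw [pv_addAt_length]; exact hp q (List.mem_cons_of_mem _ hq))
    rw [List.foldl_cons, hrec, pv_getD_addAt base p.1 j p.2 h1]
    by_cases hj : p.1 = j
    · simp [hj]; ring
    · simp [hj, Ne.symm hj]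

-- generic loop bridge: a pySetD/pyGetD increment loop is an addAt loop, as long as every
-- touched index is in range of the (length-invariant) accumulator
lemma pv_loop_eq (n : Nat) (ps : List (Int × Int)) (acc : List Int)
    (hlen : acc.length = n)
    (hin : ∀ p ∈ ps, PySem.Raise.InRange n (pvRaw p.1)) :
    ps.foldl (fun acc p =>
        PySem.List.pySetD acc (pvRaw p.1) (PySem.List.pyGetD acc (pvRaw p.1) 0 + p.2)) acc
      = ps.foldl (fun xs p => pvAddAt xs (pvToIdx n (pvRaw p.1)) p.2) acc := by
  induction ps generalizing acc with
  | nil => rfl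
  | cons p t ih =>
    have hin1 : PySem.Raise.InRange acc.length (pvRaw p.1) := by
      rw [hlen]; exact hin p (List.mem_cons_self ..)
    rw [List.foldl_cons, List.foldl_cons, pv_set_eq acc (pvRaw p.1) p.2 hin1, hlen]
    exact ih _ (by rw [pv_addAt_length, hlen]) (fun q hq => hin q (List.mem_cons_of_mem _ hq))

lemma pv_cast_sum (l : List Int) (f : Int → Nat) :
    (l.map (fun x => ((f x : Nat) : Int))).sum = (((l.map f).sum : Nat) : Int) := by
  induction l with
  | nil => rfl
  | cons x t ih =>
    rw [List.map_cons, List.sum_cons, ih, List.map_cons, List.sum_cons]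
    push_cast
    ring

-- sum of the counter's counts over the ids hitting slot j = number of list elements hitting slot j
lemma pv_scatter_sum (fl : List Int) (q : Int → Bool) :
    (((PySem.Set.ofList fl).filter q).map (fun k => ((fl.count k : Nat) : Int))).sum
      = ((fl.filter q).length : Int) := by
  have hperm : (PySem.Set.ofList fl).Perm fl.dedup := by
    rw [List.perm_ext_iff_of_nodup (PySem.Set.nodup_ofList fl) fl.nodup_dedup]
    intro a
    rw [List.mem_dedup, PySem.Set.mem_ofList]
  have h2 : ((PySem.Set.ofList fl).filter q).Perm (fl.dedup.filter q) := hperm.filter q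
  have h3 := (h2.map (fun k => ((fl.count k : Nat) : Int))).sum_eq
  rw [h3, pv_cast_sum]
  have h5 := List.sum_map_count_dedup_filter_eq_countP q fl
  rw [List.countP_eq_length_filter] at h5
  exact_mod_cast congrArg (fun x : Nat => (x : Int)) h5

lemma pv_getD_eq_getElem (xs : List Int) (j : Nat) (hj : j < xs.length) :
    xs.getD j 0 = xs[j] := by
  rw [List.getD_eq_getElem?_getD, List.getElem?_eq_getElem hj]
  rfl

-- A-side loop bridge (per element, count 1)
lemma pv_loopA (n : Nat) (l : List Int) (acc : List Int)
    (hlen : acc.length = n)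
    (hin : ∀ id ∈ l, PySem.Raise.InRange n (pvRaw id)) :
    l.foldl (fun acc id =>
        PySem.List.pySetD acc (pvRaw id) (PySem.List.pyGetD acc (pvRaw id) 0 + 1)) acc
      = l.foldl (fun xs id => pvAddAt xs (pvToIdx n (pvRaw id)) 1) acc := by
  induction l generalizing acc with
  | nil => rfl
  | cons x t ih =>
    have hin1 : PySem.Raise.InRange acc.length (pvRaw x) := by
      rw [hlen]; exact hin x (List.mem_cons_self ..)
    rw [List.foldl_cons, List.foldl_cons, pv_set_eq acc (pvRaw x) 1 hin1, hlen]
    exact ih _ (by rw [pv_addAt_length, hlen]) (fun q hq => hin q (List.mem_cons_of_mem _ hq))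

-- the main equivalence
lemma pv_main (my_items : List Int) (items : List (Int × Int))
    (hpre : Pre_items_one_hot my_items items) :
    items_one_hot my_items items = items_one_hot_alt my_items items := by
  set n : Nat := (PySem.List.dedup (items.map Prod.fst)).length with hn
  set fl : List Int := my_items.filter (fun id => !(id == 0)) with hfl
  have hmemfl : ∀ id ∈ fl, PySem.Raise.InRange n (pvRaw id) := by
    intro id hid
    rw [hfl, List.mem_filter] at hid
    have h0 : id ≠ 0 := by simpa using hid.2
    exact hpre id hid.1 h0
  have hbase : (PySem.List.dedup (items.map Prod.fst)).foldl (fun acc _ => acc ++ [(0:Int)]) []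
      = List.replicate n 0 := by
    rw [PySem.List.foldl_append_singleton_eq_map, List.nil_append, List.map_const']
  -- A as a fold of pairs (slot, 1) over fl
  have hA : items_one_hot my_items items
      = (fl.map (fun id => (pvToIdx n (pvRaw id), (1:Int)))).foldl
          (fun xs p => pvAddAt xs p.1 p.2) (List.replicate n 0) := by
    have hstep : (fun (acc : List Int) (item_id : Int) =>
        if item_id = 0 then acc
        else
          let index_for_dic : Int := if item_id < 265 then item_id - 1 else item_id - 2
          PySem.List.pySetD acc index_for_dic (PySem.List.pyGetD acc index_for_dic 0 + 1))
        = (fun (acc : List Int) (item_id : Int) =>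
            if (!(item_id == 0)) = true then
              PySem.List.pySetD acc (pvRaw item_id) (PySem.List.pyGetD acc (pvRaw item_id) 0 + 1)
            else acc) := by
      funext acc item_id
      by_cases h : item_id = 0 <;> simp [h, pvRaw]
    have hloop := pv_loopA n fl (List.replicate n 0) (by simp) hmemfl
    unfold items_one_hot
    rw [hbase, hstep, ← List.foldl_filter, ← hfl, hloop]
    simp [List.foldl_map]
  -- B as a fold of pairs (slot, count) over the distinct ids of fl
  have hcounts : my_items.foldl (fun d item_id =>
        if item_id ≠ 0 then d.insert item_id (d.getD item_id 0 + 1) else d)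
        PySem.Dict.empty
      = PySem.Dict.counter fl := by
    have hstep : (fun (d : PySem.Dict Int Int) (item_id : Int) =>
        if item_id ≠ 0 then d.insert item_id (d.getD item_id 0 + 1) else d)
        = (fun (d : PySem.Dict Int Int) (item_id : Int) =>
            if (!(item_id == 0)) = true then d.insert item_id (d.getD item_id 0 + 1) else d) := by
      funext d item_id
      by_cases h : item_id = 0 <;> simp [h]
    rw [hstep, ← List.foldl_filter, ← hfl, PySem.Dict.foldl_insert_getD_add_one_eq_counter]
  have hB : items_one_hot_alt my_items items
      = ((PySem.Set.ofList fl).map (fun k => (pvToIdx n (pvRaw k), ((fl.count k : Nat) : Int)))).foldl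
          (fun xs p => pvAddAt xs p.1 p.2) (List.replicate n 0) := by
    have hloop := pv_loop_eq n ((PySem.Set.ofList fl).map (fun k => (k, ((fl.count k : Nat) : Int))))
      (List.replicate n 0) (by simp)
      (by intro p hp; rw [List.mem_map] at hp; obtain ⟨k, hk, rfl⟩ := hp
          exact hmemfl k ((PySem.Set.mem_ofList fl k).mp hk))
    unfold items_one_hot_alt
    rw [hcounts]
    dsimp only
    rw [PySem.Dict.items_counter, ← hn]
    refine hloop.trans ?_
    simp [List.foldl_map]
  rw [hA, hB]
  have hinA : ∀ p ∈ fl.map (fun id => (pvToIdx n (pvRaw id), (1:Int))),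
      p.1 < (List.replicate (α := Int) n 0).length := by
    intro p hp
    rw [List.mem_map] at hp
    obtain ⟨id, hid, rfl⟩ := hp
    simpa using pv_toIdx_lt (hmemfl id hid)
  have hinB : ∀ p ∈ (PySem.Set.ofList fl).map (fun k => (pvToIdx n (pvRaw k), ((fl.count k : Nat) : Int))),
      p.1 < (List.replicate (α := Int) n 0).length := by
    intro p hp
    rw [List.mem_map] at hp
    obtain ⟨k, hk, rfl⟩ := hp
    simpa using pv_toIdx_lt (hmemfl k ((PySem.Set.mem_ofList fl k).mp hk))
  apply List.ext_getElem
  · rw [pv_foldl_addAt_length, pv_foldl_addAt_length]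
  · intro j hj1 hj2
    rw [← pv_getD_eq_getElem _ j hj1, ← pv_getD_eq_getElem _ j hj2,
      pv_foldl_addAt_getD _ _ j hinA, pv_foldl_addAt_getD _ _ j hinB]
    congr 1
    have hfA : (fl.map (fun id => (pvToIdx n (pvRaw id), (1:Int)))).filter (fun p => p.1 == j)
        = (fl.filter (fun id => pvToIdx n (pvRaw id) == j)).map
            (fun id => (pvToIdx n (pvRaw id), (1:Int))) := by
      rw [List.filter_map]; rfl
    have hfB : ((PySem.Set.ofList fl).map (fun k => (pvToIdx n (pvRaw k), ((fl.count k : Nat) : Int)))).filter (fun p => p.1 == j)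
        = ((PySem.Set.ofList fl).filter (fun k => pvToIdx n (pvRaw k) == j)).map
            (fun k => (pvToIdx n (pvRaw k), ((fl.count k : Nat) : Int))) := by
      rw [List.filter_map]; rfl
    rw [hfA, hfB, List.map_map, List.map_map]
    have hsumA : ((fl.filter (fun id => pvToIdx n (pvRaw id) == j)).map
        ((Prod.snd ∘ fun id => (pvToIdx n (pvRaw id), (1:Int))))).sum
        = ((fl.filter (fun id => pvToIdx n (pvRaw id) == j)).length : Int) := by
      have he : ((Prod.snd ∘ fun id => (pvToIdx n (pvRaw id), (1:Int)))) = (fun (_ : Int) => (1:Int)) := rfl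
      rw [he, PySem.List.sum_map_const_int]
      simp
    have hsumB : (((PySem.Set.ofList fl).filter (fun k => pvToIdx n (pvRaw k) == j)).map
        ((Prod.snd ∘ fun k => (pvToIdx n (pvRaw k), ((fl.count k : Nat) : Int))))).sum
        = ((fl.filter (fun k => pvToIdx n (pvRaw k) == j)).length : Int) := by
      have he : ((Prod.snd ∘ fun k => (pvToIdx n (pvRaw k), ((fl.count k : Nat) : Int))))
          = (fun k => ((fl.count k : Nat) : Int)) := rfl
      rw [he]
      exact pv_scatter_sum fl (fun k => pvToIdx n (pvRaw k) == j)
    rw [hsumA, hsumB]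

-- ===== VERDICT (by name: the statement is the Claim_ definition above) =====
theorem items_one_hot_spec : Claim_equal_items_one_hot := by
  intro my_items items _hdom hpre
  unfold Spec_items_one_hot
  exact pv_main my_items items hpre
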